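-- pv_equiv track=rewrite | github.com/FixBrain/skillfacroty-rep | module_0/main.py | game_core
-- ===== SOURCE A (Python) =====
-- def game_core(number):
--     """Функция, угадывающая загаданное целое число методом половинного деления.
--
--     :param number: угадываемое число
--     :return: угаданное число
--     """
--     count = 0
--     predict_a = 1 # начало диапазона, которому принадлежит загаданное число
--     predict_b = 100 # конец диапазона, которому принадлежит загаданное число
--     predict = (predict_a + predict_b) // 2 # стартовое значение, с которого перебираем
--
--     # выполняем алгоритм, пока значения прогноза и введенного числа не сойдутся
--     while predict != number:
--         # если введенное число больше текущего прогноза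
--         if number > predict:
--             # сдвигаем нижнюю границу исследуемого диапазона в текущее предсказание
--             predict_a = predict + 1
--         # если введенное число меньше текущего прогноза
--         elif number < predict:
--             # сдвигаем верхнюю границу исследуемого диапазона в текущее предсказание
--             predict_b = predict - 1
--         # в качестве нового прогноза выбираем середину измененного диапазона
--         predict = (predict_a + predict_b) // 2
--         count += 1
--
--     return count
-- ===== SOURCE B (Python) =====
-- def game_core(number):
--     """Look up the guess count in a depth table of the binary-search tree over 1..100.
--
--     Instead of searching for `number`, build the whole midpoint tree once
--     (each midpoint m of an interval [a, b] is guessed at depth d) and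
--     return the recorded depth of `number`.
--     """
--     depths = {}
--
--     def build(a, b, d):
--         if a > b:
--             return
--         m = (a + b) // 2
--         depths[m] = d
--         build(a, m - 1, d + 1)
--         build(m + 1, b, d + 1)
--
--     build(1, 100, 0)
--     return depths[number]
-- ===== Notes on version B (the rewrite author's own statement) =====
-- stated objective: alternative
-- what changed: Replaces A's iterative halving search for the given number by recursively building the complete midpoint-depth table of the binary-search tree over 1..100 once and looking the number up in it.
-- outside the precondition, e.g. on game_core(0): A returns 6, B raises KeyError
import Mathlib
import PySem

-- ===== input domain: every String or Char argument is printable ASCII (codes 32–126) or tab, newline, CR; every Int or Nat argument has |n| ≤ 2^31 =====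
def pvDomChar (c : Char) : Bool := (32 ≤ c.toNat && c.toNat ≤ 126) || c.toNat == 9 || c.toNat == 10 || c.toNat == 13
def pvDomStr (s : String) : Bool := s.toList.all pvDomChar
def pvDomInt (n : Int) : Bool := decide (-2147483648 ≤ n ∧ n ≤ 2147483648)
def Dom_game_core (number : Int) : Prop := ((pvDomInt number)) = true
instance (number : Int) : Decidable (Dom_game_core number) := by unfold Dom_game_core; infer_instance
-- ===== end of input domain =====

-- B replaces A's interactive binary search by building the whole midpoint-depth
-- table of the search tree over 1..100 once and looking the number up (objective:
-- alternative decomposition; no speed claim).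

-- ===== PORT A =====
-- A's while loop, transliterated with state (predict_a, predict_b, predict, count).
-- `fuel` only makes the loop total; under Pre_ (1 ≤ number ≤ 100) it never runs out.
def gameLoopA (fuel : Nat) (number pa pb predict count : Int) : Int :=
  match fuel with
  | 0 => count
  | fuel + 1 =>
    if predict ≠ number then
      let pa' := if number > predict then predict + 1 else pa
      let pb' := if number > predict then pb else if number < predict then predict - 1 else pb
      let predict' := PySem.Int.floordiv (pa' + pb') 2
      gameLoopA fuel number pa' pb' predict' (count + 1)
    else count

def game_core (number : Int) : Int :=
  gameLoopA 200 number 1 100 (PySem.Int.floordiv (1 + 100) 2) 0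

-- ===== PORT B =====
-- B's recursive `build`: record the midpoint of [a, b] at depth d, recurse on both halves.
-- `fuel` only makes the recursion total (recursion depth over [1,100] is ≤ 7).
def buildDepths (fuel : Nat) (a b d : Int) (acc : PySem.Dict Int Int) : PySem.Dict Int Int :=
  match fuel with
  | 0 => acc
  | fuel + 1 =>
    if a > b then acc
    else
      let m := PySem.Int.floordiv (a + b) 2
      let acc1 := acc.insert m d
      let acc2 := buildDepths fuel a (m - 1) (d + 1) acc1
      buildDepths fuel (m + 1) b (d + 1) acc2

-- `depths[number]`: Python raises KeyError when the key is absent; Pre_ excludes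
-- exactly those inputs, so the `getD 0` default is unreachable under Pre_.
def game_core_alt (number : Int) : Int :=
  (buildDepths 200 1 100 0 (PySem.Dict.mk [])).getD number 0

-- ===== PRECONDITION & SPEC =====
-- Pre_ excludes inputs outside 1..100: there A either loops forever (number < 0 or
-- number > 100) or, at number = 0, returns a value while B's dict lookup raises KeyError.
def Pre_game_core (number : Int) : Prop := 1 ≤ number ∧ number ≤ 100
instance (number : Int) : Decidable (Pre_game_core number) := by unfold Pre_game_core; infer_instance

def pvWitness_game_core : Int := (42)

def Spec_game_core (number : Int) (out : Int) : Prop := out = game_core_alt number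
instance (number : Int) (out : Int) : Decidable (Spec_game_core number out) := by unfold Spec_game_core; infer_instance

-- ===== CLAIM =====
def Claim_equal_game_core : Prop := ∀ (number : Int), Dom_game_core number → Pre_game_core number → Spec_game_core number (game_core number)

-- ===== LEMMAS AND PROOFS =====
-- The whole domain is the finite range 1..100: check every case by kernel evaluation.
set_option maxRecDepth 8000 in
theorem game_core_cases : ∀ m : Nat, m < 100 → game_core (1 + (m : Int)) = game_core_alt (1 + (m : Int)) := by decide

-- ===== VERDICT =====
theorem game_core_spec : Claim_equal_game_core := by
  intro number _ hpre
  obtain ⟨h1, h2⟩ := hpre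
  have hm : number = 1 + ((number - 1).toNat : Int) := by omega
  have hlt : (number - 1).toNat < 100 := by omega
  unfold Spec_game_core
  rw [hm]
  exact game_core_cases _ hlt
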